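-- pv_equiv track=rewrite | github.com/piyush-kgp/DSAlgoPractice | codechef/codechef_practice-master/ZCO12001.py | nest_depths
-- ===== SOURCE A (Python) =====
-- def nest_depths(arr):
--     i=0
--     braces = 0
--     tracker=[]
--     while i<len(arr):
--         if arr[i]==1:
--             braces+=1
--         elif arr[i]==2:
--             braces-=1
--         tracker.append(braces)
--         i+=1
--     return tracker
-- ===== SOURCE B (Python) =====
-- def nest_depths(arr):
--     # Divide and conquer: depths of left half, depths of right half
--     # computed independently, then the right half is shifted by the
--     # final depth of the left half.
--     def solve(seg):
--         if len(seg) <= 1: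
--             if not seg:
--                 return []
--             x = seg[0]
--             return [1 if x == 1 else -1 if x == 2 else 0]
--         m = len(seg) // 2
--         left = solve(seg[:m])
--         right = solve(seg[m:])
--         off = left[-1]
--         return left + [d + off for d in right]
--     return solve(arr)
-- ===== Notes on version B (the rewrite author's own statement) =====
-- stated objective: alternative
-- what changed: Replaced A's single stateful left-to-right scan by a divide-and-conquer recursion: each half's depth list is computed independently and the right half is shifted by the left half's final depth.
import Mathlib
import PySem

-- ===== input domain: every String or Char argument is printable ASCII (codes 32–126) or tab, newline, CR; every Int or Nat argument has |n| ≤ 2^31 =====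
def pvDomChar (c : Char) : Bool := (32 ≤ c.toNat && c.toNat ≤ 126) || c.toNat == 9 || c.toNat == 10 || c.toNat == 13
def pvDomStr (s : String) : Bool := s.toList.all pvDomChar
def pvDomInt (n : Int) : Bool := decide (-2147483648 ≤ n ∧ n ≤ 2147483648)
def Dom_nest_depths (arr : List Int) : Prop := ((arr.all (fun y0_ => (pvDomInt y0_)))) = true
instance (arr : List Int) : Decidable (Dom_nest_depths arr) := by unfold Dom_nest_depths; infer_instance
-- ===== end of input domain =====

-- B replaces A's single stateful scan by an independent divide-and-conquer recursion (alternative decomposition; no speed claim).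
-- ===== PORT A =====
-- while loop over index i with state (braces, tracker); tracker.append → tracker ++ [braces]
def nest_depths (arr : List Int) : List Int :=
  (arr.foldl (fun (st : Int × List Int) x =>
    let braces := if x == 1 then st.1 + 1 else if x == 2 then st.1 - 1 else st.1
    (braces, st.2 ++ [braces])) (0, [])).2

-- ===== PORT B =====
-- solve: divide and conquer; left[-1] is safe in Python since the left half is
-- nonempty whenever this branch runs, ported as getLastD 0 (the default is never used).
def solveDC (seg : List Int) : List Int :=
  if h : seg.length ≤ 1 then
    match seg with
    | [] => []
    | x :: _ => [if x == 1 then (1 : Int) else if x == 2 then -1 else 0]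
  else
    let m := seg.length / 2
    let left := solveDC (seg.take m)
    let right := solveDC (seg.drop m)
    let off := left.getLastD 0
    left ++ right.map (fun d => d + off)
termination_by seg.length
decreasing_by
  · simp only [List.length_take]; omega
  · simp only [List.length_drop]; omega

def nest_depths_alt (arr : List Int) : List Int := solveDC arr

-- ===== PRECONDITION & SPEC =====
def Spec_nest_depths (arr : List Int) (out : List Int) : Prop := out = nest_depths_alt arr
instance (arr : List Int) (out : List Int) : Decidable (Spec_nest_depths arr out) := by unfold Spec_nest_depths; infer_instance

-- ===== CLAIM (what is proved, stated in full; the proofs are below) =====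
def Claim_equal_nest_depths : Prop := ∀ (arr : List Int), Dom_nest_depths arr → Spec_nest_depths arr (nest_depths arr)

-- ===== LEMMAS AND PROOFS =====
def pvDelta (x : Int) : Int := if x == 1 then 1 else if x == 2 then -1 else 0

-- running-depth scan, the common reference both ports reduce to
def pvAcc (b : Int) : List Int → List Int
  | [] => []
  | x :: xs => (b + pvDelta x) :: pvAcc (b + pvDelta x) xs

lemma getLastD_cons' (x b : Int) (l : List Int) :
    (x :: l).getLastD b = l.getLastD x := by
  cases l <;> simp [List.getLastD]

lemma pvAcc_append (l r : List Int) : ∀ b,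
    pvAcc b (l ++ r) = pvAcc b l ++ pvAcc ((pvAcc b l).getLastD b) r := by
  induction l with
  | nil => intro b; simp [pvAcc]
  | cons x xs ih =>
    intro b
    simp only [List.cons_append, pvAcc, ih (b + pvDelta x), getLastD_cons']

lemma pvAcc_shift (l : List Int) : ∀ b c,
    pvAcc (b + c) l = (pvAcc b l).map (fun d => d + c) := by
  induction l with
  | nil => intro b c; simp [pvAcc]
  | cons x xs ih =>
    intro b c
    simp only [pvAcc, List.map_cons]
    congr 1
    · ring
    · have := ih (b + pvDelta x) c
      rw [← this]; ring_nf

lemma solveDC_eq_aux : ∀ (n : ℕ) (l : List Int), l.length ≤ n → solveDC l = pvAcc 0 l := by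
  intro n
  induction n with
  | zero =>
    intro l hl
    have : l = [] := List.eq_nil_of_length_eq_zero (Nat.le_zero.mp hl)
    subst this; simp [solveDC, pvAcc]
  | succ n ih =>
    intro l hl
    by_cases h : l.length ≤ 1
    · unfold solveDC
      rw [dif_pos h]
      match l, h with
      | [], _ => simp [pvAcc]
      | [x], _ => simp [pvAcc, pvDelta]
    · rw [show solveDC l = solveDC (l.take (l.length / 2)) ++
          (solveDC (l.drop (l.length / 2))).map
            (fun d => d + (solveDC (l.take (l.length / 2))).getLastD 0) by
        conv_lhs => rw [solveDC]
        rw [dif_neg h]]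
      have hm : l.length / 2 < l.length := by omega
      have hm1 : 1 ≤ l.length / 2 := by omega
      have h1 : (l.take (l.length / 2)).length ≤ n := by
        simp only [List.length_take]; omega
      have h2 : (l.drop (l.length / 2)).length ≤ n := by
        simp only [List.length_drop]; omega
      rw [ih _ h1, ih _ h2]
      conv_rhs => rw [← List.take_append_drop (l.length / 2) l]
      rw [pvAcc_append]
      congr 1
      have hoff : (pvAcc 0 (l.take (l.length / 2))).getLastD 0
          = 0 + (pvAcc 0 (l.take (l.length / 2))).getLastD 0 := by ring
      rw [hoff, ← pvAcc_shift]
      ring_nf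

lemma solveDC_eq (l : List Int) : solveDC l = pvAcc 0 l :=
  solveDC_eq_aux l.length l le_rfl

lemma loop_eq (arr : List Int) : ∀ (b : Int) (t : List Int),
    (arr.foldl (fun (st : Int × List Int) x =>
      let braces := if x == 1 then st.1 + 1 else if x == 2 then st.1 - 1 else st.1
      (braces, st.2 ++ [braces])) (b, t)).2
    = t ++ pvAcc b arr := by
  induction arr with
  | nil => intro b t; simp [pvAcc]
  | cons x xs ih =>
    intro b t
    simp only [List.foldl_cons, pvAcc]
    rw [ih]
    by_cases h1 : x == 1 <;> by_cases h2 : x == 2 <;>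
      simp [h1, h2, pvDelta, List.append_assoc, sub_eq_add_neg]

-- ===== VERDICT (by name: the statement is the Claim_ definition above) =====
theorem nest_depths_spec : Claim_equal_nest_depths := by
  intro arr _
  unfold Spec_nest_depths nest_depths nest_depths_alt
  rw [loop_eq, solveDC_eq]
  simp
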